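-- pv_equiv track=rewrite | github.com/PavPavv/solve_problems | python/easy/square_each_num.py | square_each_num
-- ===== SOURCE A (Python) =====
-- def square_each_num(num):
--   if num < 10:
--     return num
--
--   result = ''
--   slist = list(format(num))
--   for item in slist:
--     squareNum = int(item)*int(item)
--     result += format(squareNum)
--   return int(result)
-- ===== SOURCE B (Python) =====
-- def square_each_num(num):
--     if num < 10:
--         return num
--     parts = []
--     n = num
--     while n:
--         d = n % 10
--         parts.append(str(d * d))
--         n //= 10
--     return int(''.join(reversed(parts)))
-- ===== Notes on version B (the rewrite author's own statement) =====
-- stated objective: alternative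
-- what changed: B extracts digits arithmetically (n % 10 / n //= 10, right to left) instead of stringifying num and re-parsing each character; squares are collected in a list and joined once rather than appended to a string in a loop.
import Mathlib
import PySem

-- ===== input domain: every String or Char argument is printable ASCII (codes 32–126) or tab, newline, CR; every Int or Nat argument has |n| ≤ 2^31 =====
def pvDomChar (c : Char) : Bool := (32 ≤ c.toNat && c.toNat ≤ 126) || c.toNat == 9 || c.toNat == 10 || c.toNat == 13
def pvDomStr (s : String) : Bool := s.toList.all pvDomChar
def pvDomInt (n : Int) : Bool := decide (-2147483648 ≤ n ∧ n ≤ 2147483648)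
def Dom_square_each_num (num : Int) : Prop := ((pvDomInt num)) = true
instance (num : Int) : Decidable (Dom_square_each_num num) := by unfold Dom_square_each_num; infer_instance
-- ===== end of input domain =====

-- B replaces A's stringify-and-reparse digit walk by arithmetic digit extraction (n % 10, n //= 10) with a single join; alternative decomposition, no speed claim.

-- ===== PORT A =====
def square_each_num (num : Int) : Int :=
  if num < 10 then num
  else
    -- slist = list(format(num))
    let slist := (PySem.Int.toStr num).toList
    let result := slist.foldl (fun (r : String) (item : Char) =>
      -- int(item): item is always a decimal digit here, so int() never raises; getD 0 is unreachable
      let v := (PySem.Int.ofChars? [item]).getD 0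
      let squareNum := v * v
      r ++ PySem.Int.toStr squareNum) ""
    -- int(result): result is a nonempty digit string, never a ValueError; getD 0 is unreachable
    (PySem.Int.ofStr? result).getD 0

-- ===== PORT B =====
-- the while loop of Source B: peel digits of n (least significant first), collecting str(d*d)
def altParts (n : Nat) : List String :=
  if n = 0 then []
  else PySem.Int.toStr (((n % 10 : Nat) : Int) * ((n % 10 : Nat) : Int)) :: altParts (n / 10)
  decreasing_by exact Nat.div_lt_self (Nat.pos_of_ne_zero (by assumption)) (by norm_num)

def square_each_num_alt (num : Int) : Int :=
  if num < 10 then num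
  else
    -- int(''.join(reversed(parts))); num ≥ 10 so num.toNat is num and the string is nonempty digits
    (PySem.Int.ofStr? (String.join (altParts num.toNat).reverse)).getD 0

-- ===== PRECONDITION & SPEC =====
def Spec_square_each_num (num : Int) (out : Int) : Prop := out = square_each_num_alt num
instance (num : Int) (out : Int) : Decidable (Spec_square_each_num num out) := by unfold Spec_square_each_num; infer_instance

-- ===== CLAIM (what is proved, stated in full; the proofs are below) =====
def Claim_equal_square_each_num : Prop := ∀ (num : Int), Dom_square_each_num num → Spec_square_each_num num (square_each_num num)

-- ===== LEMMAS AND PROOFS =====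

-- int('d') for a single decimal digit char
lemma ofChars_digitChar (d : Nat) (hd : d < 10) :
    PySem.Int.ofChars? [Nat.digitChar d] = some (d : Int) := by
  interval_cases d <;> decide

-- A's loop body, on the digit char of d, appends exactly str(d*d)
lemma step_digitChar (r : String) (d : Nat) (hd : d < 10) :
    r ++ PySem.Int.toStr (((PySem.Int.ofChars? [Nat.digitChar d]).getD 0) *
        ((PySem.Int.ofChars? [Nat.digitChar d]).getD 0))
      = r ++ PySem.Int.toStr ((d : Int) * (d : Int)) := by
  rw [ofChars_digitChar d hd]
  rfl

lemma altParts_pos (n : Nat) (hn : 0 < n) :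
    altParts n = PySem.Int.toStr (((n % 10 : Nat) : Int) * ((n % 10 : Nat) : Int)) :: altParts (n / 10) := by
  rw [altParts, if_neg (Nat.pos_iff_ne_zero.mp hn)]

-- the char list of A's accumulated string equals the char list of B's joined parts
lemma fold_toList (n : Nat) (hn : 0 < n) (init : String) :
    ((Nat.toDigits 10 n).foldl (fun (r : String) (item : Char) =>
        r ++ PySem.Int.toStr (((PySem.Int.ofChars? [item]).getD 0) *
          ((PySem.Int.ofChars? [item]).getD 0))) init).toList
      = init.toList ++ (String.join (altParts n).reverse).toList := by
  induction n using Nat.strong_induction_on generalizing init with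
  | _ n ih =>
    by_cases h10 : n < 10
    · rw [Nat.toDigits_of_lt_base h10]
      rw [altParts_pos n hn, altParts, if_pos (Nat.div_eq_of_lt h10)]
      simp [List.foldl_cons, List.foldl_nil, step_digitChar init n h10,
        Nat.mod_eq_of_lt h10, String.toList_join, String.toList_append]
    · have hb : (10:Nat) ≤ n := le_of_not_gt h10
      have hq : 0 < n / 10 := Nat.div_pos hb (by norm_num)
      rw [Nat.toDigits_of_base_le (by norm_num) hb, List.foldl_append]
      simp only [List.foldl_cons, List.foldl_nil,
        step_digitChar _ (n % 10) (Nat.mod_lt n (by norm_num))]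
      rw [String.toList_append, ih (n / 10) (Nat.div_lt_self hn (by norm_num)) hq init]
      rw [altParts_pos n hn]
      simp [List.reverse_cons, String.toList_join, List.map_append,
        List.flatten_append, String.toList_append, List.append_assoc]

-- for num ≥ 10 the digit chars A iterates over are Nat.toDigits 10 num.toNat
lemma toStr_toList_of_ge (num : Int) (h : 10 ≤ num) :
    (PySem.Int.toStr num).toList = Nat.toDigits 10 num.toNat := by
  rw [PySem.Int.toList_toStr, PySem.Int.toChars, if_neg (by omega)]

theorem square_each_num_eq (num : Int) : square_each_num num = square_each_num_alt num := by
  unfold square_each_num square_each_num_alt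
  by_cases h : num < 10
  · simp [h]
  · simp only [if_neg h]
    have h10 : (10:Int) ≤ num := le_of_not_gt h
    have hpos : 0 < num.toNat := by omega
    have hres :
        ((((PySem.Int.toStr num).toList).foldl (fun (r : String) (item : Char) =>
          r ++ PySem.Int.toStr (((PySem.Int.ofChars? [item]).getD 0) *
            ((PySem.Int.ofChars? [item]).getD 0))) "").toList)
          = (String.join (altParts num.toNat).reverse).toList := by
      rw [toStr_toList_of_ge num h10, fold_toList num.toNat hpos ""]
      rfl
    simp only [PySem.Int.ofStr?, hres]

-- ===== VERDICT (by name: the statement is the Claim_ definition above) =====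
theorem square_each_num_spec : Claim_equal_square_each_num := by
  intro num _
  exact square_each_num_eq num
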